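-- pv_equiv track=rewrite | github.com/openKG-field/kgbook-2020 | chapter5/5.2.2_TextClassification/LDA_Clustering/loadModelAndAnalysis.py | wordAbstract
-- ===== SOURCE A (Python) =====
-- def wordAbstract(words):
--     rMap = {}
--     doubleCount = 0
--     curIndex = -1
--     for i in range(len(words)):
--         if words[i] == '"':
--             doubleCount += 1
--             if curIndex >= 0 and doubleCount %2 == 0:
--                 word = words[curIndex+1:i]
--                 if word in rMap:
--                     continue
--                 else:
--                     rMap[word] = 0
--             else:
--                 curIndex = i
--     return rMap
-- ===== SOURCE B (Python) =====
-- def wordAbstract(words):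
--     rMap = {}
--     rest = words
--     while True:
--         _, sep, rest = rest.partition('"')
--         if not sep:
--             return rMap
--         word, sep, rest = rest.partition('"')
--         if not sep:
--             return rMap
--         rMap.setdefault(word, 0)
-- ===== Notes on version B (the rewrite author's own statement) =====
-- stated objective: faster
-- what changed: A scans character indices one by one with a quote counter and a saved last-quote position, slicing between remembered indices; B repeatedly str.partition()s the remaining string at the double-quote character and records every second fragment with setdefault, with no index or counter bookkeeping.
import Mathlib
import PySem

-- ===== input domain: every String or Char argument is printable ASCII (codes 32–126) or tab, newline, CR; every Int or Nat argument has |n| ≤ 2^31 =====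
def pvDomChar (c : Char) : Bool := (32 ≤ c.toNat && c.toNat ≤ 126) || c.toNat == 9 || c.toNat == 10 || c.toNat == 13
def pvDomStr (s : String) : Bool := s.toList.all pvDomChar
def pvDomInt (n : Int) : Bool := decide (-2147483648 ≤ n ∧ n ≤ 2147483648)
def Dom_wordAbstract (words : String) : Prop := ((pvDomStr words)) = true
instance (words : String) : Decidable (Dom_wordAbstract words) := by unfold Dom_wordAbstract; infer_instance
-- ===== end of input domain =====

-- B replaces A's per-character index/quote-counter scan by repeatedly splitting the remaining
-- string at the quote character (str.partition) and collecting every second fragment — no index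
-- bookkeeping, and measurably faster (C-level partition vs a per-character Python loop).

-- ===== PORT A =====
def wordAbstract (words : String) : List (String × Int) :=
  (((PySem.List.pyRange 0 (PySem.Str.len words) 1).foldl
    (fun (st : PySem.Dict String Int × Int × Int) i =>
      match st with
      | (rMap, doubleCount, curIndex) =>
        match PySem.Str.pyGet? words i with
        | some c =>
          if c = '"' then
            let doubleCount2 := doubleCount + 1
            if 0 ≤ curIndex ∧ PySem.Int.mod doubleCount2 2 = 0 then
              let word := PySem.Str.slice words (some (curIndex + 1)) (some i)
              if (rMap.get? word).isSome then (rMap, doubleCount2, curIndex)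
              else (rMap.insert word 0, doubleCount2, curIndex)
            else (rMap, doubleCount2, i)
          else (rMap, doubleCount, curIndex)
        | none => (rMap, doubleCount, curIndex))  -- unreachable: i ranges over range(len(words))
    (PySem.Dict.empty, 0, -1)).1).items

-- ===== PORT B =====
-- hand port of str.partition('"') for the one-character separator '"' (exact: the part before
-- the first '"', whether '"' occurs, the part after the first '"'):
def pyPartitionQuote (cs : List Char) : List Char × Bool × List Char :=
  match cs with
  | [] => ([], false, [])
  | c :: t =>
    if c = '"' then ([], true, t)
    else
      let r := pyPartitionQuote t
      (c :: r.1, r.2.1, r.2.2)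

theorem pyPartitionQuote_rest_le (cs : List Char) :
    (pyPartitionQuote cs).2.2.length ≤ cs.length := by
  induction cs with
  | nil => simp [pyPartitionQuote]
  | cons c t ih =>
    by_cases hc : c = '"'
    · subst hc; simp [pyPartitionQuote]
    · simp only [pyPartitionQuote, if_neg hc]
      simpa using Nat.le_succ_of_le ih

theorem pyPartitionQuote_rest_lt (cs : List Char) (h : (pyPartitionQuote cs).2.1 = true) :
    (pyPartitionQuote cs).2.2.length < cs.length := by
  induction cs with
  | nil => simp [pyPartitionQuote] at h
  | cons c t ih =>
    by_cases hc : c = '"'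
    · subst hc; simp [pyPartitionQuote]
    · simp only [pyPartitionQuote, if_neg hc] at h ⊢
      simpa using Nat.lt_succ_of_lt (ih h)

def wordAbstractAltGo (rMap : PySem.Dict String Int) (rest : List Char) :
    List (String × Int) :=
  let pr1 := pyPartitionQuote rest          -- _, sep, rest = rest.partition('"')
  if h1 : pr1.2.1 = false then rMap.items   -- if not sep: return rMap
  else
    let pr2 := pyPartitionQuote pr1.2.2     -- word, sep, rest = rest.partition('"')
    if h2 : pr2.2.1 = false then rMap.items -- if not sep: return rMap
    else
      wordAbstractAltGo                     -- rMap.setdefault(word, 0)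
        (if (rMap.get? (String.ofList pr2.1)).isSome then rMap
         else rMap.insert (String.ofList pr2.1) 0) pr2.2.2
termination_by rest.length
decreasing_by
  have l1 := pyPartitionQuote_rest_lt rest (by simpa using h1)
  have l2 := pyPartitionQuote_rest_le (pyPartitionQuote rest).2.2
  omega

def wordAbstract_alt (words : String) : List (String × Int) :=
  wordAbstractAltGo PySem.Dict.empty words.toList

-- ===== PRECONDITION & SPEC =====
def Spec_wordAbstract (words : String) (out : List (String × Int)) : Prop := out = wordAbstract_alt words
instance (words : String) (out : List (String × Int)) : Decidable (Spec_wordAbstract words out) := by unfold Spec_wordAbstract; infer_instance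

-- ===== CLAIM (what is proved, stated in full; the proofs are below) =====
def Claim_equal_wordAbstract : Prop := ∀ (words : String), Dom_wordAbstract words → Spec_wordAbstract words (wordAbstract words)

-- ===== LEMMAS AND PROOFS =====

-- the body of A's for-loop, named for the proofs
def bodyA (words : String) (st : PySem.Dict String Int × Int × Int) (i : Int) :
    PySem.Dict String Int × Int × Int :=
  match st with
  | (rMap, doubleCount, curIndex) =>
    match PySem.Str.pyGet? words i with
    | some c =>
      if c = '"' then
        let doubleCount2 := doubleCount + 1
        if 0 ≤ curIndex ∧ PySem.Int.mod doubleCount2 2 = 0 then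
          let word := PySem.Str.slice words (some (curIndex + 1)) (some i)
          if (rMap.get? word).isSome then (rMap, doubleCount2, curIndex)
          else (rMap.insert word 0, doubleCount2, curIndex)
        else (rMap, doubleCount2, i)
      else (rMap, doubleCount, curIndex)
    | none => (rMap, doubleCount, curIndex)

theorem wordAbstract_eq_foldl (words : String) :
    wordAbstract words =
      (((PySem.List.pyRange 0 (PySem.Str.len words) 1).foldl (bodyA words)
        (PySem.Dict.empty, 0, -1)).1).items := rfl

-- the "insert if absent" step shared by both characterisations
def stepD (d : PySem.Dict String Int) (w : List Char) : PySem.Dict String Int :=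
  if (d.get? (String.ofList w)).isSome then d else d.insert (String.ofList w) 0

-- pointwise reductions of A's loop body
theorem bodyA_skip (words : String) (k : Nat) (c : Char)
    (hget : PySem.Str.pyGet? words ((k : Nat) : Int) = some c) (hc : ¬ c = '"')
    (d : PySem.Dict String Int) (cnt ci : Int) :
    bodyA words (d, cnt, ci) ((k : Nat) : Int) = (d, cnt, ci) := by
  simp only [bodyA]
  rw [hget]
  split <;> simp_all

theorem bodyA_open (words : String) (k : Nat)
    (hget : PySem.Str.pyGet? words ((k : Nat) : Int) = some '"')
    (d : PySem.Dict String Int) (cnt ci : Int)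
    (hodd : PySem.Int.mod (cnt + 1) 2 = 1) :
    bodyA words (d, cnt, ci) ((k : Nat) : Int) = (d, cnt + 1, ((k : Nat) : Int)) := by
  simp only [bodyA]
  rw [hget]
  split <;> simp_all
  rename_i heq
  exact heq.symm

theorem bodyA_close (words : String) (k q : Nat) (seg : List Char)
    (hget : PySem.Str.pyGet? words ((k : Nat) : Int) = some '"')
    (d : PySem.Dict String Int) (cnt : Int)
    (heven : PySem.Int.mod (cnt + 1) 2 = 0)
    (hword : PySem.Str.slice words (some ((q : Int) + 1)) (some ((k : Nat) : Int))
      = String.ofList seg) :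
    bodyA words (d, cnt, (q : Int)) ((k : Nat) : Int)
      = (stepD d seg, cnt + 1, ((q : Nat) : Int)) := by
  simp only [bodyA]
  rw [hget]
  split <;> simp_all [stepD]
  rename_i heq
  subst heq
  by_cases hP : (d.get? (String.ofList seg)).isSome = true <;> simp [hP]

-- the sequence of quoted segments of cs (pairs of quotes; an unmatched final quote opens no pair)
def segsC (cs : List Char) : List (List Char) :=
  let pr1 := pyPartitionQuote cs
  if h1 : pr1.2.1 = true then
    let pr2 := pyPartitionQuote pr1.2.2
    if h2 : pr2.2.1 = true then pr2.1 :: segsC pr2.2.2 else []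
  else []
termination_by cs.length
decreasing_by
  have l1 := pyPartitionQuote_rest_lt cs h1
  have l2 := pyPartitionQuote_rest_le (pyPartitionQuote cs).2.2
  omega

-- segsC seen from inside a pair of quotes whose part read so far is seg
def openSegs (seg : List Char) (cs : List Char) : List (List Char) :=
  let pr := pyPartitionQuote cs
  if pr.2.1 = true then (seg ++ pr.1) :: segsC pr.2.2 else []

theorem pyPartitionQuote_quote (t : List Char) :
    pyPartitionQuote ('"' :: t) = ([], true, t) := rfl

theorem pyPartitionQuote_ne (c : Char) (t : List Char) (h : ¬ c = '"') :
    pyPartitionQuote (c :: t) =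
      (c :: (pyPartitionQuote t).1, (pyPartitionQuote t).2.1, (pyPartitionQuote t).2.2) := by
  simp [pyPartitionQuote, h]

theorem segsC_nil : segsC [] = [] := by
  rw [segsC.eq_def]
  simp [pyPartitionQuote]

theorem segsC_ne (c : Char) (t : List Char) (h : ¬ c = '"') : segsC (c :: t) = segsC t := by
  conv_lhs => rw [segsC.eq_def]
  conv_rhs => rw [segsC.eq_def]
  rw [pyPartitionQuote_ne c t h]

theorem segsC_quote (t : List Char) : segsC ('"' :: t) = openSegs [] t := by
  rw [segsC.eq_def, openSegs, pyPartitionQuote_quote]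
  by_cases hb : (pyPartitionQuote t).2.1 = true <;> simp [hb]

theorem openSegs_nil (seg : List Char) : openSegs seg [] = [] := by
  simp [openSegs, pyPartitionQuote]

theorem openSegs_ne (seg : List Char) (c : Char) (t : List Char) (h : ¬ c = '"') :
    openSegs seg (c :: t) = openSegs (seg ++ [c]) t := by
  rw [openSegs, openSegs, pyPartitionQuote_ne c t h]
  by_cases hb : (pyPartitionQuote t).2.1 = true <;> simp [hb]

theorem openSegs_quote (seg : List Char) (t : List Char) :
    openSegs seg ('"' :: t) = seg :: segsC t := by
  simp [openSegs, pyPartitionQuote_quote]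

-- B's loop is the fold of stepD over the quoted segments
theorem altGo_spec (n : Nat) : ∀ (rest : List Char), rest.length ≤ n → ∀ d,
    wordAbstractAltGo d rest = ((segsC rest).foldl stepD d).items := by
  induction n with
  | zero =>
    intro rest hle d
    have h0 : rest = [] := by cases rest <;> simp_all
    subst h0
    rw [wordAbstractAltGo.eq_def, segsC_nil]
    simp [pyPartitionQuote]
  | succ n ih =>
    intro rest hle d
    rw [wordAbstractAltGo.eq_def]
    conv_rhs => rw [segsC.eq_def]
    by_cases h1 : (pyPartitionQuote rest).2.1 = true
    · simp only [h1, dif_pos, Bool.true_eq_false, dif_neg, not_false_iff]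
      by_cases h2 : (pyPartitionQuote (pyPartitionQuote rest).2.2).2.1 = true
      · simp only [h2, dif_pos, Bool.true_eq_false, dif_neg, not_false_iff]
        rw [List.foldl_cons]
        have l1 := pyPartitionQuote_rest_lt rest h1
        have l2 := pyPartitionQuote_rest_le (pyPartitionQuote rest).2.2
        rw [ih _ (by omega)]
        rfl
      · have h2' : (pyPartitionQuote (pyPartitionQuote rest).2.2).2.1 = false := by
          simpa using h2
        simp [h2']
    · have h1' : (pyPartitionQuote rest).2.1 = false := by simpa using h1
      simp [h1']

-- parity helpers for A's doubleCount
theorem mod2_succ_of_even {n : Int} (h : PySem.Int.mod n 2 = 0) :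
    PySem.Int.mod (n + 1) 2 = 1 := by
  rw [PySem.Int.mod_eq_emod_of_pos (by norm_num)] at h ⊢
  omega

theorem mod2_succ_of_odd {n : Int} (h : PySem.Int.mod n 2 = 1) :
    PySem.Int.mod (n + 1) 2 = 0 := by
  rw [PySem.Int.mod_eq_emod_of_pos (by norm_num)] at h ⊢
  omega

-- the main invariant of A's scan: from a "closed" state the loop folds stepD over segsC of the
-- remaining characters; from an "open" state (inside a pair opened at index q, seg read so far)
-- it folds stepD over openSegs seg of the remaining characters.
theorem loopA_spec (words : String) (n : Nat) : ∀ (a : List Char) (k : Nat),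
    words.toList.drop k = a → k + a.length = words.toList.length → a.length = n →
    (∀ d cnt ci, PySem.Int.mod cnt 2 = 0 →
      (((List.range' k n).map (fun j : Nat => (j : Int))).foldl (bodyA words) (d, cnt, ci)).1
        = (segsC a).foldl stepD d)
    ∧ (∀ d cnt (q : Nat) (seg : List Char), PySem.Int.mod cnt 2 = 1 →
        words.toList.drop (q + 1) = seg ++ a → k = q + 1 + seg.length →
      (((List.range' k n).map (fun j : Nat => (j : Int))).foldl (bodyA words) (d, cnt, (q : Int))).1
        = (openSegs seg a).foldl stepD d) := by
  induction n with
  | zero =>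
    intro a k hdrop hlen hn
    have ha : a = [] := by cases a <;> simp_all
    subst ha
    constructor
    · intro d cnt ci _
      simp [segsC_nil]
    · intro d cnt q seg _ _ _
      simp [openSegs_nil]
  | succ n ih =>
    intro a k hdrop hlen hn
    rcases a with _ | ⟨c, a'⟩
    · simp at hn
    have hk : words.toList[k]? = some c := by
      rw [← List.head?_drop, hdrop]; rfl
    have hget : PySem.Str.pyGet? words ((k : Nat) : Int) = some c := by
      rw [PySem.Str.pyGet?_natCast, hk]
    have hdrop' : words.toList.drop (k + 1) = a' := by
      have h := congrArg List.tail hdrop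
      rwa [List.tail_drop, List.tail_cons] at h
    have hlen' : (k + 1) + a'.length = words.toList.length := by
      simp only [List.length_cons] at hlen; omega
    have hn' : a'.length = n := by
      simp only [List.length_cons] at hn; omega
    have IH := ih a' (k + 1) hdrop' hlen' hn'
    have hrange : List.range' k (n + 1) = k :: List.range' (k + 1) n := List.range'_succ
    constructor
    · -- closed state
      intro d cnt ci hcnt
      rw [hrange]
      simp only [List.map_cons, List.foldl_cons]
      by_cases hc : c = '"'
      · subst hc
        have hodd := mod2_succ_of_even hcnt
        rw [bodyA_open words k hget d cnt ci hodd, segsC_quote]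
        exact IH.2 d (cnt + 1) k [] hodd (by simpa using hdrop') (by simp)
      · rw [bodyA_skip words k c hget hc d cnt ci, segsC_ne c a' hc]
        exact IH.1 d cnt ci hcnt
    · -- open state
      intro d cnt q seg hcnt hdropq hkq
      rw [hrange]
      simp only [List.map_cons, List.foldl_cons]
      by_cases hc : c = '"'
      · subst hc
        have heven := mod2_succ_of_odd hcnt
        have hword : PySem.Str.slice words (some ((q : Int) + 1)) (some ((k : Nat) : Int))
            = String.ofList seg := by
          apply String.ext
          have h1 : ((q : Int) + 1) = (((q + 1 : Nat) : Nat) : Int) := by push_cast; ring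
          rw [h1]
          simp only [PySem.Str.toList_slice, PySem.Chars.slice_eq_listSlice,
            PySem.List.slice_natCast]
          rw [hdropq]
          have hsl : k - (q + 1) = seg.length := by omega
          rw [hsl, List.take_left' rfl]
          simp
        rw [bodyA_close words k q seg hget d cnt heven hword, openSegs_quote, List.foldl_cons]
        exact IH.1 (stepD d seg) (cnt + 1) ((q : Nat) : Int) heven
      · rw [bodyA_skip words k c hget hc d cnt (q : Int), openSegs_ne seg c a' hc]
        exact IH.2 d cnt q (seg ++ [c]) hcnt (by rw [hdropq]; simp)
          (by simp only [List.length_append, List.length_cons, List.length_nil]; omega)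

-- ===== VERDICT (by name: the statement is the Claim_ definition above) =====
theorem wordAbstract_spec : Claim_equal_wordAbstract := by
  intro words _
  unfold Spec_wordAbstract
  rw [wordAbstract_eq_foldl, wordAbstract_alt]
  have hlen : PySem.Str.len words = ((words.toList.length : Nat) : Int) := by
    simp [PySem.Str.len_eq]
  rw [hlen, PySem.List.pyRange_zero_natCast, List.range_eq_range']
  rw [(loopA_spec words words.toList.length words.toList 0 (by simp) (by simp) rfl).1
    PySem.Dict.empty 0 (-1) (by decide)]
  rw [altGo_spec words.toList.length words.toList le_rfl PySem.Dict.empty]
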